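-- pv_equiv track=rewrite | github.com/imjiaoyuan/jutils | src/jsrc/math/hcluster.py | _cut_tree
-- ===== SOURCE A (Python) =====
-- def _cut_tree(merge_history, n, k):
--     if k >= n:
--         return list(range(n))
--     sorted_merges = sorted(merge_history, key=lambda x: x[2])
--     cuts = n - k
--     parent = list(range(n))
--     def find(x):
--         while parent[x] != x:
--             parent[x] = parent[parent[x]]
--             x = parent[x]
--         return x
--     def union(x, y):
--         px, py = find(x), find(y)
--         if px != py:
--             parent[py] = px
--     for m in sorted_merges[:cuts]:
--         union(m[0] if m[0] < n else 0, m[1] if m[1] < n else 0)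
--     cluster_map = {}
--     next_cl = 0
--     for i in range(n):
--         p = find(i)
--         if p not in cluster_map:
--             cluster_map[p] = next_cl
--             next_cl += 1
--         yield cluster_map[p]
-- ===== SOURCE B (Python) =====
-- def _cut_tree(merge_history, n, k):
--     if k >= n:
--         return list(range(n))
--     edges = sorted(merge_history, key=lambda m: m[2])[:n - k]
--     # merge clusters by wholesale relabeling instead of a union-find forest
--     comp = list(range(n))
--     for a, b, _ in edges:
--         ca = comp[a if a < n else 0]
--         cb = comp[b if b < n else 0]
--         if ca != cb:
--             comp = [ca if c == cb else c for c in comp]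
--     labels = {}
--     for i in range(n):
--         c = comp[i]
--         if c not in labels:
--             labels[c] = len(labels)
--         yield labels[c]
-- ===== Notes on version B (the rewrite author's own statement) =====
-- stated objective: simpler
-- what changed: Replaces the mutable union-find forest (find with path halving + union helpers) by wholesale cluster relabeling: an array comp maps each node to its cluster representative and merging an edge rewrites every occurrence of one representative, so the find/union machinery disappears.
import Mathlib
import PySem

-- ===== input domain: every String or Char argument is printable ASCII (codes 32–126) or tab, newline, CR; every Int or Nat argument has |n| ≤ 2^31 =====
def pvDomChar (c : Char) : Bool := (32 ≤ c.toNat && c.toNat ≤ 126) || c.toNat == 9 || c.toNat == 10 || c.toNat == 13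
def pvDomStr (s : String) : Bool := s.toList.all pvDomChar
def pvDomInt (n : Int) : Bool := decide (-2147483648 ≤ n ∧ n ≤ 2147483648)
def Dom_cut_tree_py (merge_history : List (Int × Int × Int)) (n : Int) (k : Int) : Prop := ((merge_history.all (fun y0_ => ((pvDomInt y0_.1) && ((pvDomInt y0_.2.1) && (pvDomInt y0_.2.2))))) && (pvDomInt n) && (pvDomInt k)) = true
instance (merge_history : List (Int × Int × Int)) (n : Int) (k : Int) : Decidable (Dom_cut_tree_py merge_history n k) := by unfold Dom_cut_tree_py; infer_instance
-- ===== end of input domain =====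

-- B replaces A's mutable union-find forest by wholesale relabeling of a cluster array (simpler: no find/union helpers).
-- Both Pythons are generators: for k >= n they yield nothing, so the observable output is [].

-- ===== PORT A =====
-- Python's `while parent[x] != x` loop, with path halving; `fuel` bounds the iterations — on every
-- input admitted by Pre_ the Python loop terminates within the fuel passed, so the 0-fuel and
-- out-of-range branches (where Python would loop forever / raise IndexError) are unreachable.
def findLoop (fuel : Nat) (parent : List Int) (x : Int) : List Int × Int :=
  match fuel with
  | 0 => (parent, x)
  | f + 1 =>
    match PySem.List.pyGet? parent x with
    | none => (parent, x)
    | some px =>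
      if px = x then (parent, x)
      else
        match PySem.List.pyGet? parent px with
        | none => (parent, x)
        | some ppx => findLoop f (PySem.List.pySetD parent x ppx) ppx

-- Python's `union`: px, py = find(x), find(y); if px != py: parent[py] = px
def unionStep (fuel : Nat) (parent : List Int) (x y : Int) : List Int :=
  let r1 := findLoop fuel parent x
  let r2 := findLoop fuel r1.1 y
  if r1.2 ≠ r2.2 then PySem.List.pySetD r2.1 r2.2 r1.2 else r2.1

def cut_tree_py (merge_history : List (Int × Int × Int)) (n : Int) (k : Int) : List Int :=
  if k ≥ n then []  -- the generator returns before any yield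
  else
    let sorted_merges := PySem.List.sorted merge_history (fun m => m.2.2) false
    let cuts := n - k
    let parent0 := PySem.List.pyRange 0 n 1
    let fuel := merge_history.length + n.toNat + 1
    let parent1 := (PySem.List.slice sorted_merges none (some cuts)).foldl
      (fun par m => unionStep fuel par (if m.1 < n then m.1 else 0) (if m.2.1 < n then m.2.1 else 0))
      parent0
    (((PySem.List.pyRange 0 n 1).foldl
      (fun st i =>
        let r := findLoop fuel st.1 i
        match PySem.Dict.get? st.2.1 r.2 with
        | some c => (r.1, st.2.1, st.2.2.1, st.2.2.2 ++ [c])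
        | none => (r.1, st.2.1.insert r.2 st.2.2.1, st.2.2.1 + 1, st.2.2.2 ++ [st.2.2.1]))
      (parent1, (PySem.Dict.empty : PySem.Dict Int Int), (0 : Int), ([] : List Int))).2.2.2)

-- ===== PORT B =====
def cut_tree_py_alt (merge_history : List (Int × Int × Int)) (n : Int) (k : Int) : List Int :=
  if k ≥ n then []  -- the generator returns before any yield
  else
    let edges := PySem.List.slice (PySem.List.sorted merge_history (fun m => m.2.2) false) none (some (n - k))
    let comp0 := PySem.List.pyRange 0 n 1
    let comp := edges.foldl
      (fun comp m =>
        let ca := PySem.List.pyGetD comp (if m.1 < n then m.1 else 0) 0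
        let cb := PySem.List.pyGetD comp (if m.2.1 < n then m.2.1 else 0) 0
        if ca ≠ cb then comp.map (fun c => if c = cb then ca else c) else comp)
      comp0
    ((PySem.List.pyRange 0 n 1).foldl
      (fun st i =>
        let c := PySem.List.pyGetD comp i 0
        match PySem.Dict.get? st.1 c with
        | some l => (st.1, st.2 ++ [l])
        | none => (st.1.insert c (st.1.size : Int), st.2 ++ [(st.1.size : Int)]))
      ((PySem.Dict.empty : PySem.Dict Int Int), ([] : List Int))).2

-- ===== PRECONDITION & SPEC =====
-- Pre_ excludes exactly the inputs on which A raises IndexError (B raises there too): when k < n,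
-- some merge among the first n-k distance-sorted ones has an endpoint that, after the >=n -> 0
-- remapping, lies below -n (out of range for `parent`), or n <= 0 with a nonempty merge_history
-- (the `parent` list is empty, so processing any merge raises).  Out-of-range endpoints occurring
-- only beyond the n-k cutoff, and negative in-range endpoints, stay inside Pre_.
def Pre_cut_tree_py (merge_history : List (Int × Int × Int)) (n : Int) (k : Int) : Prop :=
  n ≤ k ∨ ((n ≤ 0 → merge_history = []) ∧
    ∀ m ∈ (PySem.List.sorted merge_history (fun m => m.2.2) false).take (n - k).toNat,
      (m.1 < n → -n ≤ m.1) ∧ (m.2.1 < n → -n ≤ m.2.1))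
instance (merge_history : List (Int × Int × Int)) (n : Int) (k : Int) : Decidable (Pre_cut_tree_py merge_history n k) := by
  unfold Pre_cut_tree_py; infer_instance

def pvWitness_cut_tree_py : (List (Int × Int × Int)) × Int × Int := ([(0, 1, 5), (3, 2, 1)], 3, 1)

def Spec_cut_tree_py (merge_history : List (Int × Int × Int)) (n : Int) (k : Int) (out : List Int) : Prop := out = cut_tree_py_alt merge_history n k
instance (merge_history : List (Int × Int × Int)) (n : Int) (k : Int) (out : List Int) : Decidable (Spec_cut_tree_py merge_history n k out) := by unfold Spec_cut_tree_py; infer_instance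

-- ===== CLAIM (what is proved, stated in full; the proofs are below) =====
def Claim_equal_cut_tree_py : Prop := ∀ (merge_history : List (Int × Int × Int)) (n : Int) (k : Int), Dom_cut_tree_py merge_history n k → Pre_cut_tree_py merge_history n k → Spec_cut_tree_py merge_history n k (cut_tree_py merge_history n k)

-- ===== LEMMAS AND PROOFS =====

-- The index Python actually reads for an in-range (possibly negative) index x.
def wrapIdx (len : Nat) (x : Int) : Nat := if x < 0 then (x + len).toNat else x.toNat

-- Invariant tying A's parent forest to B's representative array `comp`:
-- lengths agree; entries are in range; comp is constant along parent edges (C1);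
-- every comp-representative is a parent-root (C2); every parent-root is its own representative (C4);
-- dep is a strictly decreasing measure along non-trivial parent edges (termination of `find`).
def UFInv (parent comp : List Int) (dep : Nat → Nat) : Prop :=
  parent.length = comp.length ∧
  (∀ j < parent.length, 0 ≤ parent.getD j 0 ∧ (parent.getD j 0).toNat < parent.length) ∧
  (∀ j < parent.length, 0 ≤ comp.getD j 0 ∧ (comp.getD j 0).toNat < parent.length) ∧
  (∀ j < parent.length, comp.getD (parent.getD j 0).toNat 0 = comp.getD j 0) ∧
  (∀ j < parent.length, parent.getD (comp.getD j 0).toNat 0 = comp.getD j 0) ∧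
  (∀ j < parent.length, parent.getD j 0 = (j : Int) → comp.getD j 0 = (j : Int)) ∧
  (∀ j < parent.length, parent.getD j 0 ≠ (j : Int) → dep (parent.getD j 0).toNat < dep j)


theorem getD_set_self (l : List Int) (n : Nat) (v d : Int) (hn : n < l.length) :
    (l.set n v).getD n d = v := by
  simp [List.getD, hn]

theorem getD_set_ne (l : List Int) (n m : Nat) (v d : Int) (hne : m ≠ n) :
    (l.set n v).getD m d = l.getD m d := by
  simp [List.getD, Ne.symm hne]

theorem getD_map_g (l : List Int) (g : Int → Int) (j : Nat) (d d' : Int) (hj : j < l.length) :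
    (l.map g).getD j d = g (l.getD j d') := by
  rw [List.getD_eq_getElem _ d (by simpa using hj), List.getD_eq_getElem l d' hj]
  simp

-- one path-halving write parent[w] := parent[parent[w]] preserves the invariant
theorem halve_dep (parent comp : List Int) (dep : Nat → Nat) (w : Nat)
    (hI : UFInv parent comp dep) (hw : w < parent.length)
    (hnr : parent.getD w 0 ≠ (w : Int)) :
    dep (parent.getD (parent.getD w 0).toNat 0).toNat < dep w := by
  obtain ⟨hlen, hpr, hcr, hC1, hC2, hC4, hWF⟩ := hI
  have hpx := hpr w hw
  have h1 : dep (parent.getD w 0).toNat < dep w := hWF w hw hnr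
  by_cases hroot : parent.getD (parent.getD w 0).toNat 0 = ((parent.getD w 0).toNat : Int)
  · rw [hroot, Int.toNat_natCast]; exact h1
  · exact lt_trans (hWF _ hpx.2 hroot) h1

theorem halve_inv (parent comp : List Int) (dep : Nat → Nat) (w : Nat)
    (hI : UFInv parent comp dep) (hw : w < parent.length)
    (hnr : parent.getD w 0 ≠ (w : Int)) :
    UFInv (parent.set w (parent.getD (parent.getD w 0).toNat 0)) comp dep := by
  have hd := halve_dep parent comp dep w hI hw hnr
  obtain ⟨hlen, hpr, hcr, hC1, hC2, hC4, hWF⟩ := hI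
  have hpx := hpr w hw
  have hppx := hpr (parent.getD w 0).toNat hpx.2
  set px := parent.getD w 0 with hpxdef
  set ppx := parent.getD px.toNat 0 with hppxdef
  have hppne : ppx ≠ (w : Int) := by
    intro h
    rw [h] at hd
    simp at hd
  refine ⟨by simpa using hlen, ?_, ?_, ?_, ?_, ?_, ?_⟩
  · intro j hj
    simp only [List.length_set] at hj ⊢
    by_cases hjw : j = w
    · subst hjw; rw [getD_set_self _ _ _ _ hj]; exact hppx
    · rw [getD_set_ne _ _ _ _ _ hjw]; exact hpr j hj
  · intro j hj
    simp only [List.length_set] at hj ⊢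
    exact hcr j hj
  · intro j hj
    simp only [List.length_set] at hj
    by_cases hjw : j = w
    · subst hjw
      rw [getD_set_self _ _ _ _ hj]
      rw [hC1 px.toNat hpx.2, hC1 j hj]
    · rw [getD_set_ne _ _ _ _ _ hjw]; exact hC1 j hj
  · intro j hj
    simp only [List.length_set] at hj
    have hr := hcr j hj
    have hrw : (comp.getD j 0).toNat ≠ w := by
      intro h
      apply hnr
      have h2 := hC2 j hj
      rw [h] at h2
      rw [← hpxdef] at h2
      rw [h2, ← h]
      exact (Int.toNat_of_nonneg hr.1).symm
    rw [getD_set_ne _ _ _ _ _ hrw]; exact hC2 j hj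
  · intro j hj
    simp only [List.length_set] at hj
    by_cases hjw : j = w
    · subst hjw
      rw [getD_set_self _ _ _ _ hj]
      intro h; exact absurd h hppne
    · rw [getD_set_ne _ _ _ _ _ hjw]; exact hC4 j hj
  · intro j hj
    simp only [List.length_set] at hj
    by_cases hjw : j = w
    · subst hjw
      rw [getD_set_self _ _ _ _ hj]
      intro _
      exact hd
    · rw [getD_set_ne _ _ _ _ _ hjw]; exact hWF j hj

theorem find_spec (fuel : Nat) (parent comp : List Int) (dep : Nat → Nat) (x : Nat)
    (hI : UFInv parent comp dep) (hx : x < parent.length) (hf : dep x < fuel) :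
    ∃ parent', findLoop fuel parent (x : Int) = (parent', comp.getD x 0) ∧
      UFInv parent' comp dep ∧ parent'.length = parent.length := by
  induction fuel generalizing parent x with
  | zero => omega
  | succ f ih =>
    obtain ⟨hlen, hpr, hcr, hC1, hC2, hC4, hWF⟩ := hI
    have hpx := hpr x hx
    have hget : PySem.List.pyGet? parent (x : Int) = some (parent.getD x 0) := by
      simp [pysem, hx]
    by_cases hroot : parent.getD x 0 = (x : Int)
    · refine ⟨parent, ?_, ⟨hlen, hpr, hcr, hC1, hC2, hC4, hWF⟩, rfl⟩
      rw [hC4 x hx hroot]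
      rw [findLoop.eq_def]
      dsimp only
      rw [hget]
      dsimp only
      rw [if_pos hroot]
    · have hcast : ((parent.getD x 0).toNat : Int) = parent.getD x 0 :=
        Int.toNat_of_nonneg hpx.1
      have hget2 : PySem.List.pyGet? parent (parent.getD x 0) =
          some (parent.getD (parent.getD x 0).toNat 0) := by
        have h1 := PySem.List.pyGet?_natCast parent ((parent.getD x 0).toNat)
        rw [hcast] at h1
        rw [h1, List.getElem?_eq_getElem hpx.2, List.getD_eq_getElem parent 0 hpx.2]
      have hd := halve_dep parent comp dep x ⟨hlen, hpr, hcr, hC1, hC2, hC4, hWF⟩ hx hroot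
      have hIh := halve_inv parent comp dep x ⟨hlen, hpr, hcr, hC1, hC2, hC4, hWF⟩ hx hroot
      have hstep : findLoop (f + 1) parent (x : Int) =
          findLoop f (parent.set x (parent.getD (parent.getD x 0).toNat 0))
            (parent.getD (parent.getD x 0).toNat 0) := by
        conv_lhs => rw [findLoop.eq_def]
        dsimp only
        rw [hget]
        dsimp only
        rw [if_neg hroot, hget2]
        dsimp only
        rw [PySem.List.pySetD_of_nonneg _ _ (by positivity)]
        simp
      have hppnn : 0 ≤ parent.getD (parent.getD x 0).toNat 0 := (hpr _ hpx.2).1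
      have hcast2 : ((parent.getD (parent.getD x 0).toNat 0).toNat : Int) =
          parent.getD (parent.getD x 0).toNat 0 := Int.toNat_of_nonneg hppnn
      have hlen' : (parent.set x (parent.getD (parent.getD x 0).toNat 0)).length = parent.length := by simp
      obtain ⟨parent', heq, hI', hlen''⟩ := ih (parent.set x (parent.getD (parent.getD x 0).toNat 0))
        ((parent.getD (parent.getD x 0).toNat 0).toNat) hIh (by rw [hlen']; exact (hpr _ hpx.2).2)
        (by omega)
      rw [hcast2] at heq
      refine ⟨parent', ?_, hI', by rw [hlen'', hlen']⟩
      rw [hstep, heq]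
      have : comp.getD (parent.getD (parent.getD x 0).toNat 0).toNat 0 = comp.getD x 0 := by
        rw [hC1 (parent.getD x 0).toNat hpx.2, hC1 x hx]
      rw [this]

theorem pyIdx_neg (len : Nat) (x : Int) (h1 : -(len : Int) ≤ x) (h2 : x < 0) :
    PySem.List.pyIdx? len x = some (x + len).toNat := by
  simp only [PySem.List.pyIdx?, if_neg (by omega : ¬ 0 ≤ x), if_pos h1]
  congr 1
  omega

theorem find_spec_wrapped (fuel : Nat) (parent comp : List Int) (dep : Nat → Nat) (x : Int)
    (hI : UFInv parent comp dep) (hlo : -(parent.length : Int) ≤ x) (hhi : x < (parent.length : Int))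
    (hf : dep (wrapIdx parent.length x) + 1 < fuel) :
    ∃ parent', findLoop fuel parent x = (parent', comp.getD (wrapIdx parent.length x) 0) ∧
      UFInv parent' comp dep ∧ parent'.length = parent.length := by
  by_cases hneg : x < 0
  case neg =>
    rw [not_lt] at hneg
    have hx : x = ((x.toNat : Nat) : Int) := (Int.toNat_of_nonneg hneg).symm
    have hw : wrapIdx parent.length x = x.toNat := by simp [wrapIdx, not_lt.mpr hneg]
    rw [hw, hx]
    exact find_spec fuel parent comp dep x.toNat hI (by omega) (by rw [← hw]; omega)
  case pos =>
    have hw : wrapIdx parent.length x = (x + parent.length).toNat := by simp [wrapIdx, hneg]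
    set w := (x + parent.length).toNat with hwdef
    have hwlt : w < parent.length := by omega
    rw [hw] at hf
    obtain ⟨hlen, hpr, hcr, hC1, hC2, hC4, hWF⟩ := hI
    have hpx := hpr w hwlt
    match fuel, hf with
    | f + 1, hf =>
    have hget : PySem.List.pyGet? parent x = some (parent.getD w 0) := by
      simp only [PySem.List.pyGet?, pyIdx_neg parent.length x hlo hneg, ← hwdef,
        Option.bind_some]
      rw [List.getElem?_eq_getElem hwlt, List.getD_eq_getElem parent 0 hwlt]
    have hpxne : parent.getD w 0 ≠ x := by
      intro h; rw [h] at hpx; omega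
    have hset : ∀ v : Int, PySem.List.pySetD parent x v = parent.set w v := by
      intro v
      simp only [PySem.List.pySetD, PySem.List.pySet?, pyIdx_neg parent.length x hlo hneg,
        ← hwdef, Option.map_some, Option.getD_some]
    have hcast : ((parent.getD w 0).toNat : Int) = parent.getD w 0 := Int.toNat_of_nonneg hpx.1
    have hget2 : PySem.List.pyGet? parent (parent.getD w 0) =
        some (parent.getD (parent.getD w 0).toNat 0) := by
      have h1 := PySem.List.pyGet?_natCast parent ((parent.getD w 0).toNat)
      rw [hcast] at h1
      rw [h1, List.getElem?_eq_getElem hpx.2, List.getD_eq_getElem parent 0 hpx.2]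
    have hstep : findLoop (f + 1) parent x =
        findLoop f (parent.set w (parent.getD (parent.getD w 0).toNat 0))
          (parent.getD (parent.getD w 0).toNat 0) := by
      conv_lhs => rw [findLoop.eq_def]
      dsimp only
      rw [hget]
      dsimp only
      rw [if_neg hpxne, hget2]
      dsimp only
      rw [hset]
    rw [hw, hstep]
    by_cases hroot : parent.getD w 0 = (w : Int)
    · -- w is its own root: the write re-stores the same value
      have hsame : parent.getD (parent.getD w 0).toNat 0 = parent.getD w 0 := by
        rw [hroot]; simp only [Int.toNat_natCast]; exact hroot
      have hid : parent.set w (parent.getD (parent.getD w 0).toNat 0) = parent := by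
        rw [hsame]
        rw [List.getD_eq_getElem parent 0 hwlt]
        simp
      rw [hid, hsame, hroot]
      have := find_spec f parent comp dep w ⟨hlen, hpr, hcr, hC1, hC2, hC4, hWF⟩ hwlt (by omega)
      exact this
    · have hd := halve_dep parent comp dep w ⟨hlen, hpr, hcr, hC1, hC2, hC4, hWF⟩ hwlt hroot
      have hIh := halve_inv parent comp dep w ⟨hlen, hpr, hcr, hC1, hC2, hC4, hWF⟩ hwlt hroot
      have hppnn : 0 ≤ parent.getD (parent.getD w 0).toNat 0 := (hpr _ hpx.2).1
      have hcast2 : ((parent.getD (parent.getD w 0).toNat 0).toNat : Int) =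
          parent.getD (parent.getD w 0).toNat 0 := Int.toNat_of_nonneg hppnn
      have hlen' : (parent.set w (parent.getD (parent.getD w 0).toNat 0)).length = parent.length := by simp
      obtain ⟨parent', heq, hI', hlen''⟩ := find_spec f
        (parent.set w (parent.getD (parent.getD w 0).toNat 0))
        comp dep ((parent.getD (parent.getD w 0).toNat 0).toNat) hIh
        (by rw [hlen']; exact (hpr _ hpx.2).2) (by omega)
      rw [hcast2] at heq
      refine ⟨parent', ?_, hI', by rw [hlen'', hlen']⟩
      rw [heq]
      have : comp.getD (parent.getD (parent.getD w 0).toNat 0).toNat 0 = comp.getD w 0 := by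
        rw [hC1 (parent.getD w 0).toNat hpx.2, hC1 w hwlt]
      rw [this]

-- A's `parent[py] = px` (roots py=cb, px=ca) matches B's relabeling of cb to ca
theorem relabel_inv (p2 comp : List Int) (dep : Nat → Nat) (wx wy : Nat)
    (hI : UFInv p2 comp dep) (hwx : wx < p2.length) (hwy : wy < p2.length)
    (hne : comp.getD wx 0 ≠ comp.getD wy 0) :
    UFInv (p2.set (comp.getD wy 0).toNat (comp.getD wx 0))
      (comp.map (fun c => if c = comp.getD wy 0 then comp.getD wx 0 else c))
      (fun j => if (j : Int) = comp.getD wx 0 then 0 else dep j + 1) := by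
  obtain ⟨hlen, hpr, hcr, hC1, hC2, hC4, hWF⟩ := hI
  set ca := comp.getD wx 0 with hcadef
  set cb := comp.getD wy 0 with hcbdef
  have hca := hcr wx hwx
  have hcb := hcr wy hwy
  have hcasta : ((ca.toNat : Nat) : Int) = ca := Int.toNat_of_nonneg hca.1
  have hcastb : ((cb.toNat : Nat) : Int) = cb := Int.toNat_of_nonneg hcb.1
  have hroota : p2.getD ca.toNat 0 = ca := hC2 wx hwx
  have hrootb : p2.getD cb.toNat 0 = cb := hC2 wy hwy
  have hcompa : comp.getD ca.toNat 0 = ca := by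
    have := hC4 ca.toNat hca.2 (by rw [hroota, hcasta])
    rw [this, hcasta]
  have hcompb : comp.getD cb.toNat 0 = cb := by
    have := hC4 cb.toNat hcb.2 (by rw [hrootb, hcastb])
    rw [this, hcastb]
  have hnn : ca.toNat ≠ cb.toNat := by
    intro h; apply hne; rw [← hcasta, ← hcastb, h]
  have hglen : ∀ j : Nat, j < p2.length →
      (comp.map (fun c => if c = cb then ca else c)).getD j 0 =
        (if comp.getD j 0 = cb then ca else comp.getD j 0) := by
    intro j hj
    exact getD_map_g comp _ j 0 0 (hlen ▸ hj)
  refine ⟨by simpa using hlen, ?_, ?_, ?_, ?_, ?_, ?_⟩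
  · intro j hj
    simp only [List.length_set] at hj ⊢
    by_cases hjb : j = cb.toNat
    · subst hjb; rw [getD_set_self _ _ _ _ hj]; exact ⟨hca.1, hca.2⟩
    · rw [getD_set_ne _ _ _ _ _ hjb]; exact hpr j hj
  · intro j hj
    simp only [List.length_set] at hj ⊢
    rw [hglen j hj]
    split
    · exact ⟨hca.1, hca.2⟩
    · exact hcr j hj
  · intro j hj
    simp only [List.length_set] at hj
    by_cases hjb : j = cb.toNat
    · subst hjb
      rw [getD_set_self _ _ _ _ hj, hglen ca.toNat hca.2, hglen cb.toNat hj,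
        hcompa, hcompb, if_neg hne, if_pos rfl]
    · rw [getD_set_ne _ _ _ _ _ hjb, hglen (p2.getD j 0).toNat (hpr j hj).2, hglen j hj,
        hC1 j hj]
  · intro j hj
    simp only [List.length_set] at hj
    rw [hglen j hj]
    by_cases hcbj : comp.getD j 0 = cb
    · rw [if_pos hcbj, getD_set_ne _ _ _ _ _ hnn, hroota]
    · rw [if_neg hcbj]
      have hrn : (comp.getD j 0).toNat ≠ cb.toNat := by
        intro h
        apply hcbj
        rw [← Int.toNat_of_nonneg (hcr j hj).1, h, hcastb]
      rw [getD_set_ne _ _ _ _ _ hrn]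
      exact hC2 j hj
  · intro j hj
    simp only [List.length_set] at hj
    by_cases hjb : j = cb.toNat
    · subst hjb
      rw [getD_set_self _ _ _ _ hj]
      intro h
      exact absurd (by rw [h, hcastb]) hne
    · rw [getD_set_ne _ _ _ _ _ hjb, hglen j hj]
      intro h
      have := hC4 j hj h
      rw [this]
      rw [if_neg (by
        intro hjcb
        apply hjb
        rw [← hcastb] at hjcb
        exact_mod_cast hjcb)]
  · intro j hj
    simp only [List.length_set] at hj
    by_cases hjb : j = cb.toNat
    · subst hjb
      rw [getD_set_self _ _ _ _ hj]
      intro _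
      show (if ((ca.toNat : Nat) : Int) = ca then 0 else dep ca.toNat + 1) <
        (if ((cb.toNat : Nat) : Int) = ca then 0 else dep cb.toNat + 1)
      rw [if_pos hcasta, if_neg (by rw [hcastb]; exact Ne.symm hne)]
      omega
    · rw [getD_set_ne _ _ _ _ _ hjb]
      intro h
      have hold := hWF j hj h
      have hjne : ((j : Nat) : Int) ≠ ca := by
        intro hjca
        apply h
        have hje : ca.toNat = j := by rw [← hjca]; exact Int.toNat_natCast j
        rw [hje] at hroota
        rw [hroota, hjca]
      show (if (((p2.getD j 0).toNat : Nat) : Int) = ca then 0 else dep (p2.getD j 0).toNat + 1) <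
        (if ((j : Nat) : Int) = ca then 0 else dep j + 1)
      rw [if_neg hjne]
      split
      · omega
      · omega

theorem wrapIdx_lt (len : Nat) (x : Int) (h1 : -(len : Int) ≤ x) (h2 : x < (len : Int)) :
    wrapIdx len x < len := by
  unfold wrapIdx; split <;> omega

theorem union_spec (fuel : Nat) (parent comp : List Int) (dep : Nat → Nat) (u : Nat) (x y : Int)
    (hI : UFInv parent comp dep)
    (hx : -(parent.length : Int) ≤ x ∧ x < (parent.length : Int))
    (hy : -(parent.length : Int) ≤ y ∧ y < (parent.length : Int))
    (hb : ∀ j < parent.length, dep j ≤ u) (hf : u + 2 ≤ fuel) :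
    ∃ dep',
      UFInv (unionStep fuel parent x y)
        (if comp.getD (wrapIdx parent.length x) 0 = comp.getD (wrapIdx parent.length y) 0 then comp
         else comp.map (fun c => if c = comp.getD (wrapIdx parent.length y) 0
                                 then comp.getD (wrapIdx parent.length x) 0 else c)) dep' ∧
      (∀ j < parent.length, dep' j ≤ u + 1) ∧
      (unionStep fuel parent x y).length = parent.length := by
  have hwx : wrapIdx parent.length x < parent.length := wrapIdx_lt _ _ hx.1 hx.2
  have hwy : wrapIdx parent.length y < parent.length := wrapIdx_lt _ _ hy.1 hy.2
  obtain ⟨p1, he1, hI1, hl1⟩ :=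
    find_spec_wrapped fuel parent comp dep x hI hx.1 hx.2 (by have := hb _ hwx; omega)
  obtain ⟨p2, he2, hI2, hl2⟩ :=
    find_spec_wrapped fuel p1 comp dep y hI1 (by rw [hl1]; exact hy.1) (by rw [hl1]; exact hy.2)
      (by rw [hl1]; have := hb _ hwy; omega)
  rw [hl1] at he2
  have hu : unionStep fuel parent x y =
      if comp.getD (wrapIdx parent.length x) 0 ≠ comp.getD (wrapIdx parent.length y) 0 then
        PySem.List.pySetD p2 (comp.getD (wrapIdx parent.length y) 0)
          (comp.getD (wrapIdx parent.length x) 0)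
      else p2 := by
    unfold unionStep
    rw [he1]
    dsimp only
    rw [he2]
  by_cases hcc : comp.getD (wrapIdx parent.length x) 0 = comp.getD (wrapIdx parent.length y) 0
  · rw [if_pos hcc]
    refine ⟨dep, ?_, fun j hj => by have := hb j hj; omega, ?_⟩
    · rw [hu, if_neg (by simpa using hcc)]
      exact hI2
    · rw [hu, if_neg (by simpa using hcc)]
      omega
  · have hlen2 : p2.length = parent.length := by rw [hl2, hl1]
    have hset : PySem.List.pySetD p2 (comp.getD (wrapIdx parent.length y) 0)
        (comp.getD (wrapIdx parent.length x) 0) =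
        p2.set (comp.getD (wrapIdx parent.length y) 0).toNat
          (comp.getD (wrapIdx parent.length x) 0) := by
      refine PySem.List.pySetD_of_nonneg _ _ ?_
      exact (hI.2.2.1 _ hwy).1
    have hrel := relabel_inv p2 comp dep (wrapIdx parent.length x) (wrapIdx parent.length y) hI2
      (by rw [hlen2]; exact hwx) (by rw [hlen2]; exact hwy) hcc
    refine ⟨fun j => if (j : Int) = comp.getD (wrapIdx parent.length x) 0 then 0 else dep j + 1,
      ?_, ?_, ?_⟩
    · rw [hu, if_pos hcc, hset, if_neg hcc]
      exact hrel
    · intro j hj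
      have := hb j hj
      show (if (j : Int) = comp.getD (wrapIdx parent.length x) 0 then 0 else dep j + 1) ≤ u + 1
      split <;> omega
    · rw [hu, if_pos hcc, hset]
      simp [hlen2]

theorem getD_pyRange (n : Int) (j : Nat) (hj : j < (PySem.List.pyRange 0 n 1).length) :
    (PySem.List.pyRange 0 n 1).getD j 0 = (j : Int) := by
  rw [List.getD_eq_getElem _ 0 hj, PySem.List.getElem_pyRange_one]
  simp

theorem init_inv (n : Int) :
    UFInv (PySem.List.pyRange 0 n 1) (PySem.List.pyRange 0 n 1) (fun _ => 0) := by
  have hlen := PySem.List.length_pyRange_one 0 n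
  refine ⟨rfl, ?_, ?_, ?_, ?_, ?_, ?_⟩ <;> intro j hj
  · rw [getD_pyRange n j hj]; constructor
    · positivity
    · simpa using hj
  · rw [getD_pyRange n j hj]; constructor
    · positivity
    · simpa using hj
  · rw [getD_pyRange n j hj, Int.toNat_natCast]
    exact getD_pyRange n j hj
  · rw [getD_pyRange n j hj, Int.toNat_natCast]
    exact getD_pyRange n j hj
  · intro _; rw [getD_pyRange n j hj]
  · intro h
    exact absurd (getD_pyRange n j hj) h

theorem pyGetD_wrap (l : List Int) (i : Int) (h1 : -(l.length : Int) ≤ i) (h2 : i < (l.length : Int)) :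
    PySem.List.pyGetD l i 0 = l.getD (wrapIdx l.length i) 0 := by
  by_cases hneg : i < 0
  · have hidx : PySem.List.pyIdx? l.length i = some (i + l.length).toNat := pyIdx_neg _ _ h1 hneg
    have hw : wrapIdx l.length i = (i + l.length).toNat := by simp [wrapIdx, hneg]
    rw [hw]
    simp only [PySem.List.pyGetD, PySem.List.pyGet?, hidx, Option.bind_some]
    rw [List.getElem?_eq_getElem (by omega), List.getD_eq_getElem l 0 (by omega)]
    rfl
  · rw [not_lt] at hneg
    have hw : wrapIdx l.length i = i.toNat := by simp [wrapIdx, not_lt.mpr hneg]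
    rw [hw, PySem.List.pyGetD_eq_getElem l 0 hneg h2, List.getD_eq_getElem l 0 (by omega)]

-- one merge step: A's union on the forest matches B's relabeling of the comp array
theorem fold_spec (n : Int) (F : Nat) (edges : List (Int × Int × Int)) :
    ∀ (parent comp : List Int) (dep : Nat → Nat) (u : Nat),
    UFInv parent comp dep → parent.length = n.toNat → 0 < n →
    (∀ m ∈ edges, (m.1 < n → -n ≤ m.1) ∧ (m.2.1 < n → -n ≤ m.2.1)) →
    (∀ j < parent.length, dep j ≤ u) → u + edges.length + 1 ≤ F →
    ∃ dep' u',
      UFInv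
        (edges.foldl (fun par m =>
          unionStep F par (if m.1 < n then m.1 else 0) (if m.2.1 < n then m.2.1 else 0)) parent)
        (edges.foldl (fun comp m =>
          let ca := PySem.List.pyGetD comp (if m.1 < n then m.1 else 0) 0
          let cb := PySem.List.pyGetD comp (if m.2.1 < n then m.2.1 else 0) 0
          if ca ≠ cb then comp.map (fun c => if c = cb then ca else c) else comp) comp)
        dep' ∧
      (edges.foldl (fun par m =>
          unionStep F par (if m.1 < n then m.1 else 0) (if m.2.1 < n then m.2.1 else 0)) parent).length
        = parent.length ∧
      (∀ j < parent.length, dep' j ≤ u') ∧ u' + 1 ≤ F := by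
  induction edges with
  | nil =>
    intro parent comp dep u hI hlen hn _ hb hF
    exact ⟨dep, u, hI, rfl, hb, by simpa using hF⟩
  | cons m rest ih =>
    intro parent comp dep u hI hlen hn hm hb hF
    have hmm := hm m (List.mem_cons_self)
    have hclen : comp.length = parent.length := hI.1.symm
    have hnlen : (parent.length : Int) = n := by
      rw [hlen]; exact Int.toNat_of_nonneg (by omega)
    have hxb : -(parent.length : Int) ≤ (if m.1 < n then m.1 else 0) ∧
        (if m.1 < n then m.1 else 0) < (parent.length : Int) := by
      rw [hnlen]
      by_cases h1 : m.1 < n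
      · have := hmm.1 h1; rw [if_pos h1]; omega
      · rw [if_neg h1]; omega
    have hyb : -(parent.length : Int) ≤ (if m.2.1 < n then m.2.1 else 0) ∧
        (if m.2.1 < n then m.2.1 else 0) < (parent.length : Int) := by
      rw [hnlen]
      by_cases h1 : m.2.1 < n
      · have := hmm.2 h1; rw [if_pos h1]; omega
      · rw [if_neg h1]; omega
    obtain ⟨dep1, hI1, hb1, hl1⟩ := union_spec F parent comp dep u
      (if m.1 < n then m.1 else 0) (if m.2.1 < n then m.2.1 else 0) hI hxb hyb hb (by simp at hF; omega)
    -- B's step computes the same new comp array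
    have hBstep :
        (let ca := PySem.List.pyGetD comp (if m.1 < n then m.1 else 0) 0
         let cb := PySem.List.pyGetD comp (if m.2.1 < n then m.2.1 else 0) 0
         if ca ≠ cb then comp.map (fun c => if c = cb then ca else c) else comp) =
        (if comp.getD (wrapIdx parent.length (if m.1 < n then m.1 else 0)) 0 =
            comp.getD (wrapIdx parent.length (if m.2.1 < n then m.2.1 else 0)) 0 then comp
         else comp.map (fun c =>
           if c = comp.getD (wrapIdx parent.length (if m.2.1 < n then m.2.1 else 0)) 0
           then comp.getD (wrapIdx parent.length (if m.1 < n then m.1 else 0)) 0 else c)) := by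
      rw [show PySem.List.pyGetD comp (if m.1 < n then m.1 else 0) 0 =
            comp.getD (wrapIdx parent.length (if m.1 < n then m.1 else 0)) 0 by
          rw [← hclen] at hxb ⊢; exact pyGetD_wrap comp _ hxb.1 hxb.2,
        show PySem.List.pyGetD comp (if m.2.1 < n then m.2.1 else 0) 0 =
            comp.getD (wrapIdx parent.length (if m.2.1 < n then m.2.1 else 0)) 0 by
          rw [← hclen] at hyb ⊢; exact pyGetD_wrap comp _ hyb.1 hyb.2]
      by_cases hcc : comp.getD (wrapIdx parent.length (if m.1 < n then m.1 else 0)) 0 =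
          comp.getD (wrapIdx parent.length (if m.2.1 < n then m.2.1 else 0)) 0
      · rw [if_pos hcc, if_neg (by simpa using hcc)]
      · rw [if_neg hcc, if_pos hcc]
    rw [List.foldl_cons, List.foldl_cons, hBstep]
    have hrest := ih (unionStep F parent (if m.1 < n then m.1 else 0) (if m.2.1 < n then m.2.1 else 0))
      _ dep1 (u + 1) hI1 (by rw [hl1]; exact hlen) hn
      (fun m' hm' => hm m' (List.mem_cons_of_mem _ hm'))
      (by rw [hl1]; exact hb1) (by simp at hF ⊢; omega)
    obtain ⟨dep', u', hI', hlen', hb', hF'⟩ := hrest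
    exact ⟨dep', u', hI', by rw [hlen', hl1], by rw [hl1] at hb'; exact hb', hF'⟩

-- the labeling pass: A re-finds each node's root (= comp value); both dicts grow identically,
-- A's counter next_cl equals the dict's size throughout
theorem final_spec (F : Nat) (comp : List Int) (idxs : List Int) :
    ∀ (parent : List Int) (dep : Nat → Nat) (u : Nat) (cm : PySem.Dict Int Int) (acc : List Int),
    UFInv parent comp dep → (∀ j < parent.length, dep j ≤ u) → u + 1 ≤ F →
    (∀ i ∈ idxs, 0 ≤ i ∧ i.toNat < parent.length) →
    (idxs.foldl (fun st i =>
        let r := findLoop F st.1 i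
        match PySem.Dict.get? st.2.1 r.2 with
        | some c => (r.1, st.2.1, st.2.2.1, st.2.2.2 ++ [c])
        | none => (r.1, st.2.1.insert r.2 st.2.2.1, st.2.2.1 + 1, st.2.2.2 ++ [st.2.2.1]))
      (parent, cm, (cm.size : Int), acc)).2.2.2 =
    (idxs.foldl (fun st i =>
        let c := PySem.List.pyGetD comp i 0
        match PySem.Dict.get? st.1 c with
        | some l => (st.1, st.2 ++ [l])
        | none => (st.1.insert c (st.1.size : Int), st.2 ++ [(st.1.size : Int)]))
      (cm, acc)).2 := by
  induction idxs with
  | nil => intro parent dep u cm acc _ _ _ _; rfl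
  | cons i rest ih =>
    intro parent dep u cm acc hI hb hF hmem
    have hi := hmem i (List.mem_cons_self)
    have hcast : ((i.toNat : Nat) : Int) = i := Int.toNat_of_nonneg hi.1
    obtain ⟨par2, heq, hI2, hlen2⟩ := find_spec F parent comp dep i.toNat hI hi.2
      (by have := hb i.toNat hi.2; omega)
    rw [hcast] at heq
    have hclen : comp.length = parent.length := hI.1.symm
    have hc : PySem.List.pyGetD comp i 0 = comp.getD i.toNat 0 := by
      rw [PySem.List.pyGetD_eq_getElem comp 0 hi.1 (by rw [hclen]; omega),
        List.getD_eq_getElem comp 0 (by rw [hclen]; exact hi.2)]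
    rw [List.foldl_cons, List.foldl_cons]
    dsimp only
    rw [heq, hc]
    cases hget : PySem.Dict.get? cm (comp.getD i.toNat 0) with
    | some c =>
      dsimp only
      exact ih par2 dep u cm (acc ++ [c]) hI2 (by rw [hlen2]; exact hb) hF
        (fun j hj => by rw [hlen2]; exact hmem j (List.mem_cons_of_mem _ hj))
    | none =>
      dsimp only
      have hsize : (((cm.insert (comp.getD i.toNat 0) (cm.size : Int)).size : Nat) : Int) =
          (cm.size : Int) + 1 := by
        rw [PySem.Dict.size_insert,
          if_neg (by rw [(PySem.Dict.get?_eq_none_iff_contains cm _).mp hget]; simp)]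
        push_cast
        ring
      have := ih par2 dep u (cm.insert (comp.getD i.toNat 0) (cm.size : Int))
        (acc ++ [(cm.size : Int)]) hI2 (by rw [hlen2]; exact hb) hF
        (fun j hj => by rw [hlen2]; exact hmem j (List.mem_cons_of_mem _ hj))
      rw [hsize] at this
      exact this

-- ===== VERDICT (by name: the statement is the Claim_ definition above) =====
theorem cut_tree_py_spec : Claim_equal_cut_tree_py := by
  intro mh n k _ hpre
  unfold Spec_cut_tree_py cut_tree_py cut_tree_py_alt
  by_cases hk : k ≥ n
  · rw [if_pos hk, if_pos hk]
  · rw [if_neg hk, if_neg hk]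
    have hpre' : (n ≤ 0 → mh = []) ∧
        ∀ m ∈ (PySem.List.sorted mh (fun m => m.2.2) false).take (n - k).toNat,
          (m.1 < n → -n ≤ m.1) ∧ (m.2.1 < n → -n ≤ m.2.1) := by
      cases hpre with
      | inl h => exact absurd h (by omega)
      | inr h => exact h
    by_cases hn : n ≤ 0
    · have hmh : mh = [] := hpre'.1 hn
      subst hmh
      dsimp only
      rw [PySem.List.pyRange_one_eq_nil (by omega : n ≤ (0:Int))]
      rfl
    · dsimp only
      rw [PySem.List.slice_to _ (by omega : (0:Int) ≤ n - k)]
      have hlen0 : (PySem.List.pyRange 0 n 1).length = n.toNat := by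
        rw [PySem.List.length_pyRange_one]
        congr 1
        omega
      have hF0 : 0 + ((PySem.List.sorted mh (fun m => m.2.2) false).take (n - k).toNat).length + 1 ≤
          mh.length + n.toNat + 1 := by
        rw [List.length_take, PySem.List.length_sorted]
        omega
      obtain ⟨dep', u', hI', hlen', hb', hF'⟩ :=
        fold_spec n (mh.length + n.toNat + 1)
          ((PySem.List.sorted mh (fun m => m.2.2) false).take (n - k).toNat)
          (PySem.List.pyRange 0 n 1) (PySem.List.pyRange 0 n 1) (fun _ => 0) 0
          (init_inv n) hlen0 (by omega) hpre'.2 (fun j _ => le_refl 0) hF0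
      exact final_spec (mh.length + n.toNat + 1) _ (PySem.List.pyRange 0 n 1) _ dep' u'
        PySem.Dict.empty [] hI' (fun j hj => hb' j (by rw [hlen'] at hj; exact hj)) hF'
        (fun i hi => by
          have := PySem.List.mem_pyRange_one.mp hi
          constructor
          · omega
          · rw [hlen', hlen0]; omega)
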